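-- pv_equiv track=rewrite | github.com/chuksoo/CodeMasters | TIP101 - Intro to Technical Interview Prep/Unit 7 practice.py | count_zeroes_search
-- ===== SOURCE A (Python) =====
-- def count_zeroes_search(lst, low, high):
--   # base case
--   if low > high:
--     return 0
--
--   if lst[high] == 0:
--     return high - low + 1
--
--   if lst[low] == 1:
--     return 0
--
--   # calculate mid point
--   mid = low + ((high - low)) // 2
--
--   # recursive case
--   if lst[mid] == 0:
--     if mid == high or lst[mid + 1] == 1:
--       return mid + 1
--     else:
--       return count_zeroes_search(lst, mid + 1, high)
--   else: # lst[mid] == 1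
--     return count_zeroes_search(lst, low, mid - 1)
-- ===== SOURCE B (Python) =====
-- # Iterative rewrite of A's tail recursion: one while-loop narrowing [low, high]
-- # in place instead of recursive calls; same guards in the same order.
-- def count_zeroes_search(lst, low, high):
--   while low <= high:
--     if lst[high] == 0:
--       return high - low + 1
--     if lst[low] == 1:
--       return 0
--     mid = low + (high - low) // 2
--     if lst[mid] == 0:
--       if mid == high or lst[mid + 1] == 1:
--         return mid + 1
--       low = mid + 1
--     else:
--       high = mid - 1
--   return 0
-- ===== Notes on version B (the rewrite author's own statement) =====
-- stated objective: idiomatic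
-- what changed: Replaced the tail recursion by an in-place iterative while-loop over the (low, high) bounds, with the base case folded into the loop condition.
import Mathlib
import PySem

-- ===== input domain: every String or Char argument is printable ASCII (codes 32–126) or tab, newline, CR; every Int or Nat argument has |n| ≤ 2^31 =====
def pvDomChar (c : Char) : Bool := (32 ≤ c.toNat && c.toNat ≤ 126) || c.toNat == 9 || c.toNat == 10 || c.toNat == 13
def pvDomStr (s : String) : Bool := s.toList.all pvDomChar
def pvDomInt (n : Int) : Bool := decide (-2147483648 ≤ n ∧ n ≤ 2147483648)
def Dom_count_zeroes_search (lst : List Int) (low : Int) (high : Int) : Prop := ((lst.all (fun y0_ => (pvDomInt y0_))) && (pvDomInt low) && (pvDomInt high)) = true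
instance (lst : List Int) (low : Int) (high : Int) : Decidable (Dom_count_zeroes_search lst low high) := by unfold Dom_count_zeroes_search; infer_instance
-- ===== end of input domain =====

-- B replaces A's tail recursion by an in-place iterative loop over the (low, high)
-- bounds (ported as a step function driven to a fixpoint); return values are identical.

-- ===== PORT A =====
def count_zeroes_search (lst : List Int) (low : Int) (high : Int) : Int :=
  if low > high then 0
  else if PySem.List.pyGetD lst high 0 == 0 then high - low + 1
  else if PySem.List.pyGetD lst low 0 == 1 then 0
  else
    let mid := low + PySem.Int.floordiv (high - low) 2
    if PySem.List.pyGetD lst mid 0 == 0 then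
      if mid == high || PySem.List.pyGetD lst (mid + 1) 0 == 1 then mid + 1
      else count_zeroes_search lst (mid + 1) high
    else count_zeroes_search lst low (mid - 1)
termination_by (high - low + 1).toNat
decreasing_by
  · have h2 : PySem.Int.floordiv (high - low) 2 = (high - low) / 2 :=
      PySem.Int.floordiv_eq_ediv_of_pos (by omega)
    omega
  · have h2 : PySem.Int.floordiv (high - low) 2 = (high - low) / 2 :=
      PySem.Int.floordiv_eq_ediv_of_pos (by omega)
    omega

-- ===== PORT B =====
-- one iteration of B's while-loop body: either a `return` or the updated bounds
inductive CzsOut where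
  | ret (v : Int)
  | shrink (low high : Int)
deriving DecidableEq, Repr

def czs_step (lst : List Int) (low high : Int) : CzsOut :=
  if PySem.List.pyGetD lst high 0 == 0 then .ret (high - low + 1)
  else if PySem.List.pyGetD lst low 0 == 1 then .ret 0
  else
    let mid := low + PySem.Int.floordiv (high - low) 2
    if PySem.List.pyGetD lst mid 0 == 0 then
      if mid == high || PySem.List.pyGetD lst (mid + 1) 0 == 1 then .ret (mid + 1)
      else .shrink (mid + 1) high
    else .shrink low (mid - 1)

-- termination of the loop: each `shrink` strictly narrows the interval
theorem czs_step_shrink (lst : List Int) (low high l h : Int)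
    (hlh : low ≤ high) (hs : czs_step lst low high = .shrink l h) :
    (h - l + 1).toNat < (high - low + 1).toNat := by
  have h2 : PySem.Int.floordiv (high - low) 2 = (high - low) / 2 :=
    PySem.Int.floordiv_eq_ediv_of_pos (by omega)
  simp only [czs_step, h2] at hs
  split_ifs at hs <;> injection hs with e1 e2 <;> omega

-- B's while-loop: test the condition, run the body, repeat on the new bounds
def count_zeroes_search_alt (lst : List Int) (low : Int) (high : Int) : Int :=
  if hlh : low ≤ high then
    match hs : czs_step lst low high with
    | .ret v => v
    | .shrink l h => count_zeroes_search_alt lst l h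
  else 0
termination_by (high - low + 1).toNat
decreasing_by exact czs_step_shrink lst low high l h hlh hs

-- ===== PRECONDITION & SPEC =====
-- Pre_ excludes exactly the inputs where the Python raises IndexError: low ≤ high with
-- high out of range, or low out of range when lst[high] ≠ 0 forces the lst[low] access.
def Pre_count_zeroes_search (lst : List Int) (low : Int) (high : Int) : Prop :=
  low > high ∨ (PySem.Raise.InRange lst.length high ∧
    (PySem.List.pyGetD lst high 0 = 0 ∨ PySem.Raise.InRange lst.length low))
instance (lst : List Int) (low : Int) (high : Int) : Decidable (Pre_count_zeroes_search lst low high) := by unfold Pre_count_zeroes_search; infer_instance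

def pvWitness_count_zeroes_search : List Int × Int × Int := ([0, 0, 0, 1, 1], 0, 4)

def Spec_count_zeroes_search (lst : List Int) (low : Int) (high : Int) (out : Int) : Prop := out = count_zeroes_search_alt lst low high
instance (lst : List Int) (low : Int) (high : Int) (out : Int) : Decidable (Spec_count_zeroes_search lst low high out) := by unfold Spec_count_zeroes_search; infer_instance

-- ===== CLAIM (what is proved, stated in full; the proofs are below) =====
def Claim_equal_count_zeroes_search : Prop := ∀ (lst : List Int) (low : Int) (high : Int), Dom_count_zeroes_search lst low high → Pre_count_zeroes_search lst low high → Spec_count_zeroes_search lst low high (count_zeroes_search lst low high)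

-- ===== LEMMAS AND PROOFS =====
-- A and B in fact agree on ALL inputs (both ports are total); proved by A's recursion scheme.
theorem czs_eq_aux (lst : List Int) : ∀ (n : Nat) (low high : Int),
    (high - low + 1).toNat ≤ n →
    count_zeroes_search lst low high = count_zeroes_search_alt lst low high := by
  intro n
  induction n with
  | zero =>
      intro low high hn
      rw [count_zeroes_search.eq_def, count_zeroes_search_alt.eq_def]
      simp [show low > high from by omega, show ¬ low ≤ high from by omega]
  | succ n IH =>
      intro low high hn
      rw [count_zeroes_search.eq_def, count_zeroes_search_alt.eq_def]
      by_cases hgt : low > high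
      · simp [hgt, show ¬ low ≤ high from by omega]
      · rw [if_neg hgt, dif_pos (show low ≤ high from by omega)]
        have h2 : PySem.Int.floordiv (high - low) 2 = (high - low) / 2 :=
          PySem.Int.floordiv_eq_ediv_of_pos (by omega)
        by_cases h0 : (PySem.List.pyGetD lst high 0 == 0) = true
        · rw [if_pos h0]
          cases hstep : czs_step lst low high with
          | ret v => simp [czs_step, h0] at hstep; omega
          | shrink l h => simp [czs_step, h0] at hstep
        · rw [if_neg h0]
          by_cases h1 : (PySem.List.pyGetD lst low 0 == 1) = true
          · rw [if_pos h1]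
            cases hstep : czs_step lst low high with
            | ret v => simp [czs_step, h0, h1] at hstep; omega
            | shrink l h => simp [czs_step, h0, h1] at hstep
          · rw [if_neg h1]
            simp only [h2]
            by_cases hb : (PySem.List.pyGetD lst (low + (high - low) / 2) 0 == 0) = true
            · rw [if_pos hb]
              by_cases hor : (low + (high - low) / 2 == high ||
                  PySem.List.pyGetD lst (low + (high - low) / 2 + 1) 0 == 1) = true
              · rw [if_pos hor]
                cases hstep : czs_step lst low high with
                | ret v => simp [czs_step, h0, h1, hb, hor] at hstep; omega
                | shrink l h => simp [czs_step, h0, h1, hb, hor] at hstep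
              · rw [if_neg hor]
                cases hstep : czs_step lst low high with
                | ret v => simp [czs_step, h0, h1, hb, hor] at hstep
                | shrink l h =>
                    simp [czs_step, h0, h1, hb, hor] at hstep
                    obtain ⟨hl, hh⟩ := hstep
                    subst hl; subst hh
                    exact IH (low + (high - low) / 2 + 1) high (by omega)
            · rw [if_neg hb]
              cases hstep : czs_step lst low high with
              | ret v => simp [czs_step, h0, h1, hb] at hstep
              | shrink l h =>
                  simp [czs_step, h0, h1, hb] at hstep
                  obtain ⟨hl, hh⟩ := hstep
                  subst hl; subst hh
                  exact IH low (low + (high - low) / 2 - 1) (by omega)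

theorem czs_eq (lst : List Int) (low high : Int) :
    count_zeroes_search lst low high = count_zeroes_search_alt lst low high :=
  czs_eq_aux lst (high - low + 1).toNat low high (le_refl _)

-- ===== VERDICT (by name: the statement is the Claim_ definition above) =====
theorem count_zeroes_search_spec : Claim_equal_count_zeroes_search := by
  intro lst low high _ _
  exact czs_eq lst low high
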